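-- pv_equiv track=rewrite | github.com/wrmoore444/voice-agent-demo | Interview/bot_demo_pipecat/dual_bot_service.py | _strip_speaker_prefix
-- ===== SOURCE A (Python) =====
-- def _strip_speaker_prefix(text: str, speaker: str) -> str:
--     """
--     Remove speaker prefix from LLM response if present.
--
--     Sometimes the LLM responds with "Bob: Hello there!" instead of just
--     "Hello there!". This happens because the prompt includes the format
--     "Alice: {text}" which the LLM mimics. We strip this prefix so the
--     TTS doesn't say "Bob" at the start of every utterance.
--
--     Args:
--         text: The LLM response text
--         speaker: The speaker name to look for ("Alice" or "Bob")
--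
--     Returns:
--         Text with speaker prefix removed if it was present
--
--     Example:
--         "Bob: Hello!" -> "Hello!"
--         "Hello!" -> "Hello!" (unchanged)
--     """
--     if not text:
--         return text
--     text = text.strip()
--
--     # Check for common prefix patterns (case-insensitive)
--     prefixes = [
--         f"{speaker}:",      # "Bob:"
--         f"{speaker} :",     # "Bob :"
--         f"{speaker.lower()}:",  # "bob:"
--         f"{speaker.upper()}:"   # "BOB:"
--     ]
--
--     for prefix in prefixes:
--         if text.lower().startswith(prefix.lower()):
--             text = text[len(prefix):].strip()
--             break
--
--     return text
-- ===== SOURCE B (Python) =====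
-- import re
--
--
-- def _strip_speaker_prefix(text: str, speaker: str) -> str:
--     """Strip a leading speaker-name prefix via one anchored case-insensitive regex."""
--     if not text:
--         return text
--     text = text.strip()
--     new = re.sub(rf"^{re.escape(speaker)} ?:", "", text, count=1, flags=re.IGNORECASE)
--     return new.strip()
-- ===== Notes on version B (the rewrite author's own statement) =====
-- stated objective: idiomatic
-- what changed: Replaced the four-prefix list plus lowercase-and-startswith loop by a single anchored case-insensitive regex removal (re.sub with pattern '^<escaped speaker> ?:', count=1) followed by a strip.
import Mathlib
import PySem

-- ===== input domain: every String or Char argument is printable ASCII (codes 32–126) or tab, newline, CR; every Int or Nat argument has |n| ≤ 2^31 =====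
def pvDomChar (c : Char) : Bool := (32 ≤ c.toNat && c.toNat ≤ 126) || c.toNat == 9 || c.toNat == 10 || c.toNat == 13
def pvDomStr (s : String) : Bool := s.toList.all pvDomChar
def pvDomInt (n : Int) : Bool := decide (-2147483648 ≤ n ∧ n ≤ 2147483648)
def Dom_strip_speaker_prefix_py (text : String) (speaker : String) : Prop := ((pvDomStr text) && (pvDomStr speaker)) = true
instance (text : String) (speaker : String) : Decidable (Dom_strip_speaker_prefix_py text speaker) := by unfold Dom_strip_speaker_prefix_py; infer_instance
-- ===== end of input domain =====

-- B replaces A's four-prefix lowercase-compare loop by a single anchored case-insensitive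
-- regex removal (re.sub with pattern "^<speaker> ?:", count=1); objective: idiomatic.

-- ===== PORT A =====
def pvPrefixLoopA (t : String) : List String → String
  | [] => t
  | p :: ps =>
    if PySem.Str.startswith (PySem.Str.lower t) (PySem.Str.lower p) = true then
      PySem.Str.strip (PySem.Str.slice t (some (PySem.Str.len p)) none)
    else pvPrefixLoopA t ps

def strip_speaker_prefix_py (text : String) (speaker : String) : String :=
  if text = "" then text
  else
    let t := PySem.Str.strip text
    pvPrefixLoopA t
      [speaker ++ ":", speaker ++ " :",
       PySem.Str.lower speaker ++ ":", PySem.Str.upper speaker ++ ":"]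

-- ===== PORT B =====
-- Hand port of the anchored regex "^<re.escape(speaker)> ?:" with re.IGNORECASE, matched at
-- the start of the text: each escaped speaker character matches case-insensitively
-- (exact on this literal pattern: lowerChar-equality is ASCII case folding, Python's rule here),
-- then one optional space, then ':'. Returns the remainder on a match, none otherwise.
def pvMatchCI : List Char → List Char → Option (List Char)
  | [], rest =>
    match rest with
    | [] => none
    | c :: r =>
      if c = ':' then some r
      else if c = ' ' then
        match r with
        | [] => none
        | c2 :: r2 => if c2 = ':' then some r2 else none
      else none
  | p :: ps, rest =>
    match rest with
    | [] => none
    | c :: cs =>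
      if PySem.Chars.lowerChar p = PySem.Chars.lowerChar c then pvMatchCI ps cs else none

def strip_speaker_prefix_py_alt (text : String) (speaker : String) : String :=
  if text = "" then text
  else
    let t := PySem.Chars.strip text.toList
    let new := match pvMatchCI speaker.toList t with
               | some rest => rest
               | none => t
    String.ofList (PySem.Chars.strip new)

-- ===== PRECONDITION & SPEC =====
def Spec_strip_speaker_prefix_py (text : String) (speaker : String) (out : String) : Prop := out = strip_speaker_prefix_py_alt text speaker
instance (text : String) (speaker : String) (out : String) : Decidable (Spec_strip_speaker_prefix_py text speaker out) := by unfold Spec_strip_speaker_prefix_py; infer_instance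

-- ===== CLAIM (what is proved, stated in full; the proofs are below) =====
def Claim_equal_strip_speaker_prefix_py : Prop := ∀ (text : String) (speaker : String), Dom_strip_speaker_prefix_py text speaker → Spec_strip_speaker_prefix_py text speaker (strip_speaker_prefix_py text speaker)

-- ===== LEMMAS AND PROOFS =====

theorem pvCharOfNatToNat (n : Nat) (h : n.isValidChar) : (Char.ofNat n).toNat = n := by
  simp [Char.ofNat, h]

theorem pvLowerLower (c : Char) :
    PySem.Chars.lowerChar (PySem.Chars.lowerChar c) = PySem.Chars.lowerChar c := by
  unfold PySem.Chars.lowerChar PySem.Chars.isupper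
  by_cases h : 'A' ≤ c ∧ c ≤ 'Z'
  · have hn1 : 65 ≤ c.toNat := h.1
    have hn2 : c.toNat ≤ 90 := h.2
    have hv : (c.toNat + 32).isValidChar := Or.inl (by omega)
    have ht := pvCharOfNatToNat _ hv
    have h2 : ¬ (Char.ofNat (c.toNat + 32) ≤ 'Z') := by
      intro hc
      have : (Char.ofNat (c.toNat + 32)).toNat ≤ 90 := hc
      omega
    simp [h.1, h.2, h2]
  · rcases not_and_or.mp h with h1 | h1
    · simp [h1]
    · by_cases h2 : 'A' ≤ c
      · simp [h1]
      · simp [h2]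

theorem pvLowerUpper (c : Char) :
    PySem.Chars.lowerChar (PySem.Chars.upperChar c) = PySem.Chars.lowerChar c := by
  unfold PySem.Chars.lowerChar PySem.Chars.upperChar PySem.Chars.isupper PySem.Chars.islower
  by_cases h : 'a' ≤ c ∧ c ≤ 'z'
  · have hn1 : 97 ≤ c.toNat := h.1
    have hn2 : c.toNat ≤ 122 := h.2
    have hv : (c.toNat - 32).isValidChar := Or.inl (by omega)
    have ht := pvCharOfNatToNat _ hv
    have hA : 'A' ≤ Char.ofNat (c.toNat - 32) := by
      show (65 : Nat) ≤ (Char.ofNat (c.toNat - 32)).toNat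
      omega
    have hZ : Char.ofNat (c.toNat - 32) ≤ 'Z' := by
      show (Char.ofNat (c.toNat - 32)).toNat ≤ 90
      omega
    have hvc : c.toNat.isValidChar := Or.inl (by omega)
    have hnC : ¬ (c ≤ 'Z') := by
      intro hc
      have : c.toNat ≤ 90 := hc
      omega
    have heq : Char.ofNat c.toNat = c := by
      simp [Char.ofNat, hvc]
      rfl
    simp [h.1, h.2, hA, hZ, ht, hnC]
    rw [show c.toNat - 32 + 32 = c.toNat from by omega]
    exact heq
  · rcases not_and_or.mp h with h1 | h1
    · simp [h1]
    · by_cases h2 : 'a' ≤ c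
      · simp [h1]
      · simp [h2]

theorem pvLowerCharEq (c : Char) (d : Char) (hd1 : d.toNat < 65 ∨ 90 < d.toNat)
    (hd2 : d.toNat < 97 ∨ 122 < d.toNat) :
    PySem.Chars.lowerChar c = d ↔ c = d := by
  unfold PySem.Chars.lowerChar PySem.Chars.isupper
  by_cases h : 'A' ≤ c ∧ c ≤ 'Z'
  · have hn1 : 65 ≤ c.toNat := h.1
    have hn2 : c.toNat ≤ 90 := h.2
    have hv : (c.toNat + 32).isValidChar := Or.inl (by omega)
    have ht := pvCharOfNatToNat _ hv
    simp only [h.1, h.2, decide_true, Bool.and_self, if_true]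
    constructor
    · intro he
      have : (Char.ofNat (c.toNat + 32)).toNat = d.toNat := by rw [he]
      omega
    · intro he
      subst he
      omega
  · have : (decide ('A' ≤ c) && decide (c ≤ 'Z')) = false := by
      rcases not_and_or.mp h with h1 | h1 <;> simp [h1]
    simp [this]

theorem pvLowerColon : PySem.Chars.lowerChar ':' = ':' := by decide

theorem pvLowerSpace : PySem.Chars.lowerChar ' ' = ' ' := by decide

theorem pvRstripPrefix (y : List Char) : PySem.Chars.rstrip y <+: y := by
  unfold PySem.Chars.rstrip
  have h := List.reverse_prefix.mpr (List.dropWhile_suffix (l := y.reverse) PySem.Chars.isspace)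
  rwa [List.reverse_reverse] at h

theorem pvLstripRstrip (y : List Char) (hy : y.dropWhile PySem.Chars.isspace = y) :
    (PySem.Chars.rstrip y).dropWhile PySem.Chars.isspace = PySem.Chars.rstrip y := by
  cases hzc : PySem.Chars.rstrip y with
  | nil => simp
  | cons c r =>
    have hzpre : PySem.Chars.rstrip y <+: y := pvRstripPrefix y
    rw [hzc] at hzpre
    rcases hzpre with ⟨s, hs⟩
    have hpc : PySem.Chars.isspace c = false := by
      by_contra hcc
      have hcc' : PySem.Chars.isspace c = true := by simpa using hcc
      rw [← hs, List.cons_append, List.dropWhile_cons_of_pos hcc'] at hy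
      have hlen := congrArg List.length hy
      have hle := List.length_dropWhile_le PySem.Chars.isspace (r ++ s)
      simp at hlen hle
      omega
    exact List.dropWhile_cons_of_neg (by simp [hpc])

theorem pvStripStrip (l : List Char) :
    PySem.Chars.strip (PySem.Chars.strip l) = PySem.Chars.strip l := by
  have hy : (PySem.Chars.lstrip l).dropWhile PySem.Chars.isspace = PySem.Chars.lstrip l := by
    unfold PySem.Chars.lstrip
    exact List.dropWhile_idempotent _ _
  unfold PySem.Chars.strip
  rw [show PySem.Chars.lstrip (PySem.Chars.rstrip (PySem.Chars.lstrip l)) =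
      PySem.Chars.rstrip (PySem.Chars.lstrip l) from pvLstripRstrip _ hy]
  unfold PySem.Chars.rstrip
  simp [List.dropWhile_idempotent]

theorem pvLowerAppend (l m : List Char) :
    PySem.Chars.lower (l ++ m) = PySem.Chars.lower l ++ PySem.Chars.lower m := by
  simp [PySem.Chars.lower]

theorem pvLowerLowerList (l : List Char) :
    PySem.Chars.lower (PySem.Chars.lower l) = PySem.Chars.lower l := by
  simp only [PySem.Chars.lower, List.map_map]
  exact List.map_congr_left (fun c _ => pvLowerLower c)

theorem pvLowerUpperList (l : List Char) :
    PySem.Chars.lower (PySem.Chars.upper l) = PySem.Chars.lower l := by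
  simp only [PySem.Chars.lower, PySem.Chars.upper, List.map_map]
  exact List.map_congr_left (fun c _ => pvLowerUpper c)

-- characterization of the regex matcher: it fires exactly on A's two (lower-compared) prefixes
theorem pvMatchCIEq (S L : List Char) :
    pvMatchCI S L =
      if (PySem.Chars.lower S ++ [':']) <+: PySem.Chars.lower L then some (L.drop (S.length + 1))
      else if (PySem.Chars.lower S ++ [' ', ':']) <+: PySem.Chars.lower L then some (L.drop (S.length + 2))
      else none := by
  induction S generalizing L with
  | nil =>
    cases L with
    | nil => simp [pvMatchCI, PySem.Chars.lower]
    | cons c r =>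
      have hcol := pvLowerCharEq c ':' (by left; decide) (by left; decide)
      have hsp := pvLowerCharEq c ' ' (by left; decide) (by left; decide)
      by_cases hc : c = ':'
      · subst hc
        simp [pvMatchCI, PySem.Chars.lower, List.cons_prefix_cons, pvLowerColon]
      · by_cases hs : c = ' '
        · subst hs
          cases r with
          | nil =>
            simp [pvMatchCI, PySem.Chars.lower, List.cons_prefix_cons, pvLowerSpace]
          | cons c2 r2 =>
            have hcol2 := pvLowerCharEq c2 ':' (by left; decide) (by left; decide)
            by_cases hc2 : c2 = ':'
            · subst hc2
              simp [pvMatchCI, PySem.Chars.lower, List.cons_prefix_cons, pvLowerSpace,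
                pvLowerColon]
            · have h1 : ¬ ((PySem.Chars.lower [] ++ [':']) <+:
                  PySem.Chars.lower (' ' :: c2 :: r2)) := by
                simp [PySem.Chars.lower, List.cons_prefix_cons, pvLowerSpace]
              have h2 : ¬ ((PySem.Chars.lower [] ++ [' ', ':']) <+:
                  PySem.Chars.lower (' ' :: c2 :: r2)) := by
                simp [PySem.Chars.lower, List.cons_prefix_cons, pvLowerSpace]
                intro he
                exact hc2 (hcol2.mp he.symm)
              simp [pvMatchCI, h1, h2, hc2]
        · have h1 : ¬ ((PySem.Chars.lower [] ++ [':']) <+: PySem.Chars.lower (c :: r)) := by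
            simp [PySem.Chars.lower, List.cons_prefix_cons]
            intro he
            exact hc (hcol.mp he.symm)
          have h2 : ¬ ((PySem.Chars.lower [] ++ [' ', ':']) <+: PySem.Chars.lower (c :: r)) := by
            simp [PySem.Chars.lower, List.cons_prefix_cons]
            intro he _
            exact hs (hsp.mp he.symm)
          simp [pvMatchCI, h1, h2, hc, hs]
  | cons p ps ih =>
    cases L with
    | nil => simp [pvMatchCI, PySem.Chars.lower]
    | cons c cs =>
      by_cases hpc : PySem.Chars.lowerChar p = PySem.Chars.lowerChar c
      · have : pvMatchCI (p :: ps) (c :: cs) = pvMatchCI ps cs := by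
          simp [pvMatchCI, hpc]
        rw [this, ih cs]
        simp [PySem.Chars.lower, List.cons_prefix_cons, hpc]
        split_ifs <;> rfl
      · have h1 : ¬ ((PySem.Chars.lower (p :: ps) ++ [':']) <+:
            PySem.Chars.lower (c :: cs)) := by
          simp [PySem.Chars.lower, List.cons_prefix_cons]
          intro he
          exact absurd he hpc
        have h2 : ¬ ((PySem.Chars.lower (p :: ps) ++ [' ', ':']) <+:
            PySem.Chars.lower (c :: cs)) := by
          simp [PySem.Chars.lower, List.cons_prefix_cons]
          intro he
          exact absurd he hpc
        simp [pvMatchCI, h1, h2, hpc]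

-- ===== VERDICT (by name: the statement is the Claim_ definition above) =====
theorem strip_speaker_prefix_py_spec : Claim_equal_strip_speaker_prefix_py := by
  intro text speaker _
  unfold Spec_strip_speaker_prefix_py strip_speaker_prefix_py strip_speaker_prefix_py_alt
  by_cases htext : text = ""
  · simp [htext]
  · simp only [htext, if_false]
    have hcolonS : (":" : String).toList = [':'] := by decide
    have hspcolS : (" :" : String).toList = [' ', ':'] := by decide
    have hsw : ∀ p : String,
        PySem.Str.startswith (PySem.Str.lower (PySem.Str.strip text)) (PySem.Str.lower p) =
          (PySem.Chars.lower p.toList).isPrefixOf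
            (PySem.Chars.lower (PySem.Chars.strip text.toList)) := by
      intro p
      simp [PySem.Str.startswith, PySem.Str.lower, PySem.Str.strip, PySem.Chars.startswith]
    have hlowcol : PySem.Chars.lower [':'] = [':'] := by
      simp [PySem.Chars.lower, pvLowerColon]
    have hlowspcol : PySem.Chars.lower [' ', ':'] = [' ', ':'] := by
      simp [PySem.Chars.lower, pvLowerColon, pvLowerSpace]
    have hc1 : PySem.Str.startswith (PySem.Str.lower (PySem.Str.strip text))
        (PySem.Str.lower (speaker ++ ":")) =
        (PySem.Chars.lower speaker.toList ++ [':']).isPrefixOf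
          (PySem.Chars.lower (PySem.Chars.strip text.toList)) := by
      rw [hsw]
      simp [String.toList_append, hcolonS, pvLowerAppend, hlowcol]
    have hc2 : PySem.Str.startswith (PySem.Str.lower (PySem.Str.strip text))
        (PySem.Str.lower (speaker ++ " :")) =
        (PySem.Chars.lower speaker.toList ++ [' ', ':']).isPrefixOf
          (PySem.Chars.lower (PySem.Chars.strip text.toList)) := by
      rw [hsw]
      simp [String.toList_append, hspcolS, pvLowerAppend, hlowspcol]
    have hc3 : PySem.Str.startswith (PySem.Str.lower (PySem.Str.strip text))
        (PySem.Str.lower (PySem.Str.lower speaker ++ ":")) =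
        (PySem.Chars.lower speaker.toList ++ [':']).isPrefixOf
          (PySem.Chars.lower (PySem.Chars.strip text.toList)) := by
      rw [hsw]
      simp [String.toList_append, hcolonS, pvLowerAppend, hlowcol, PySem.Str.lower,
        pvLowerLowerList]
    have hc4 : PySem.Str.startswith (PySem.Str.lower (PySem.Str.strip text))
        (PySem.Str.lower (PySem.Str.upper speaker ++ ":")) =
        (PySem.Chars.lower speaker.toList ++ [':']).isPrefixOf
          (PySem.Chars.lower (PySem.Chars.strip text.toList)) := by
      rw [hsw]
      simp [String.toList_append, hcolonS, pvLowerAppend, hlowcol, PySem.Str.upper,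
        pvLowerUpperList]
    rw [pvMatchCIEq]
    by_cases h1 : (PySem.Chars.lower speaker.toList ++ [':']) <+:
        PySem.Chars.lower (PySem.Chars.strip text.toList)
    · have hb1 : (PySem.Chars.lower speaker.toList ++ [':']).isPrefixOf
          (PySem.Chars.lower (PySem.Chars.strip text.toList)) = true :=
        List.isPrefixOf_iff_prefix.mpr h1
      rw [pvPrefixLoopA, hc1, hb1, if_pos rfl, if_pos h1]
      have hlen : PySem.Str.len (speaker ++ ":") = ((speaker.toList.length + 1 : Nat) : Int) := by
        simp [PySem.Str.len, String.toList_append, hcolonS]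
      rw [hlen]
      simp only [PySem.Str.slice, PySem.Str.strip, String.toList_ofList,
        PySem.Chars.slice_eq_listSlice, PySem.List.slice_from_natCast]
    · have hb1 : (PySem.Chars.lower speaker.toList ++ [':']).isPrefixOf
          (PySem.Chars.lower (PySem.Chars.strip text.toList)) = false := by
        rw [Bool.eq_false_iff]
        exact fun hb => h1 (List.isPrefixOf_iff_prefix.mp hb)
      rw [pvPrefixLoopA, hc1, hb1, if_neg Bool.false_ne_true, if_neg h1]
      by_cases h2 : (PySem.Chars.lower speaker.toList ++ [' ', ':']) <+:
          PySem.Chars.lower (PySem.Chars.strip text.toList)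
      · have hb2 : (PySem.Chars.lower speaker.toList ++ [' ', ':']).isPrefixOf
            (PySem.Chars.lower (PySem.Chars.strip text.toList)) = true :=
          List.isPrefixOf_iff_prefix.mpr h2
        rw [pvPrefixLoopA, hc2, hb2, if_pos rfl, if_pos h2]
        have hlen : PySem.Str.len (speaker ++ " :") =
            ((speaker.toList.length + 2 : Nat) : Int) := by
          simp [PySem.Str.len, String.toList_append, hspcolS]
        rw [hlen]
        simp only [PySem.Str.slice, PySem.Str.strip, String.toList_ofList,
          PySem.Chars.slice_eq_listSlice, PySem.List.slice_from_natCast]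
      · have hb2 : (PySem.Chars.lower speaker.toList ++ [' ', ':']).isPrefixOf
            (PySem.Chars.lower (PySem.Chars.strip text.toList)) = false := by
          rw [Bool.eq_false_iff]
          exact fun hb => h2 (List.isPrefixOf_iff_prefix.mp hb)
        rw [pvPrefixLoopA, hc2, hb2, if_neg Bool.false_ne_true, if_neg h2,
          pvPrefixLoopA, hc3, hb1, if_neg Bool.false_ne_true,
          pvPrefixLoopA, hc4, hb1, if_neg Bool.false_ne_true, pvPrefixLoopA]
        simp [PySem.Str.strip, pvStripStrip]
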